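-- pv_equiv track=rewrite | github.com/arpitprakashgupta/Metro-simulator | metro_simulator.py | station_order
-- ===== SOURCE A (Python) =====
-- def station_order(line_data):
--     stations = []
--     for i in line_data:
--         s = i.get("cur_station")
--         if s and s not in stations:
--             stations.append(s)
--         nxt = i.get("next")
--         if nxt and nxt != "-" and nxt not in stations:
--             stations.append(nxt)
--     return stations
-- ===== SOURCE B (Python) =====
-- def station_order(line_data):
--     # pass 1: tag every candidate station with a global occurrence position
--     occ = []
--     pos = 0
--     for row in line_data:
--         cur = row.get("cur_station")
--         if cur:
--             occ.append((pos, cur))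
--         pos += 1
--         nxt = row.get("next")
--         if nxt and nxt != "-":
--             occ.append((pos, nxt))
--         pos += 1
--     # pass 2: earliest position of each station (min-aggregation, no membership test)
--     first = {}
--     for p, s in occ:
--         first[s] = min(first.get(s, p), p)
--     # pass 3: stations ordered by their earliest occurrence
--     return sorted(first, key=first.get)
-- ===== Notes on version B (the rewrite author's own statement) =====
-- stated objective: alternative
-- what changed: Replaces A's interleaved membership-test-and-append dedup loop with three staged passes: tag every candidate station with a global position, min-aggregate the earliest position per station in a dict, then recover the order by sorting stations on that earliest position.
import Mathlib
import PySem

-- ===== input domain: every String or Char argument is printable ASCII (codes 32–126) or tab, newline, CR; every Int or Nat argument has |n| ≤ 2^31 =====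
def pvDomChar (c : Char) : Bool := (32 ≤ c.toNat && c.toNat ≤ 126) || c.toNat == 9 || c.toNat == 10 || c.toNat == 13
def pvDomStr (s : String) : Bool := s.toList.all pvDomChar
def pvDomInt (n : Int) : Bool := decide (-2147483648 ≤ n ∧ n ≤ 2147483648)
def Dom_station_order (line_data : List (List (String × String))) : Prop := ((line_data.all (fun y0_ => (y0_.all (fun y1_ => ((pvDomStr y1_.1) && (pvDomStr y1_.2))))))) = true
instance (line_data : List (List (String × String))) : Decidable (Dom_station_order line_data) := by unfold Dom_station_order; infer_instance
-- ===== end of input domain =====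

-- B replaces A's interleaved membership-test-and-append dedup loop by three staged passes:
-- tag each candidate with a global position, min-aggregate the earliest position per station,
-- then sort the stations by that earliest position. Same return value; no speed claim.

-- ===== PORT A =====
-- loop body of A: the two conditional 'if … not in stations: stations.append(…)' steps
def aStep_station_order (stations : List String) (i : List (String × String)) : List String :=
  let stations :=
    match i.lookup "cur_station" with
    | some s => if s ≠ "" ∧ s ∉ stations then stations ++ [s] else stations
    | none => stations
  match i.lookup "next" with
  | some nxt => if nxt ≠ "" ∧ nxt ≠ "-" ∧ nxt ∉ stations then stations ++ [nxt] else stations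
  | none => stations

def station_order (line_data : List (List (String × String))) : List String :=
  line_data.foldl aStep_station_order []

-- ===== PORT B =====
-- pass-1 loop body: append (pos, cur) / (pos, nxt) when truthy (and nxt != "-"), pos += 1 after each slot
def bStep1_station_order (st : List (Int × String) × Int) (row : List (String × String)) :
    List (Int × String) × Int :=
  let st :=
    match row.lookup "cur_station" with
    | some s => if s ≠ "" then (st.1 ++ [(st.2, s)], st.2 + 1) else (st.1, st.2 + 1)
    | none => (st.1, st.2 + 1)
  match row.lookup "next" with
  | some nxt => if nxt ≠ "" ∧ nxt ≠ "-" then (st.1 ++ [(st.2, nxt)], st.2 + 1) else (st.1, st.2 + 1)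
  | none => (st.1, st.2 + 1)

-- pass-2 loop body: first[s] = min(first.get(s, p), p)
def bStep2_station_order (d : PySem.Dict String Int) (ps : Int × String) : PySem.Dict String Int :=
  d.insert ps.2 (min (d.getD ps.2 ps.1) ps.1)

def station_order_alt (line_data : List (List (String × String))) : List String :=
  let occ := (line_data.foldl bStep1_station_order ([], 0)).1
  let first := occ.foldl bStep2_station_order PySem.Dict.empty
  -- sorted(first, key=first.get): every key is present in first, so first.get k = first.getD k 0
  PySem.List.sorted first.keys (fun k => first.getD k 0) false

-- ===== PRECONDITION & SPEC =====
def Spec_station_order (line_data : List (List (String × String))) (out : List String) : Prop := out = station_order_alt line_data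
instance (line_data : List (List (String × String))) (out : List String) : Decidable (Spec_station_order line_data out) := by unfold Spec_station_order; infer_instance

-- ===== CLAIM (what is proved, stated in full; the proofs are below) =====
def Claim_equal_station_order : Prop := ∀ (line_data : List (List (String × String))), Dom_station_order line_data → Spec_station_order line_data (station_order line_data)

-- ===== LEMMAS AND PROOFS =====

-- the candidate stations one row contributes, in order (used only by the proofs)
def cands_station_order (row : List (String × String)) : List String :=
  (match row.lookup "cur_station" with
   | some s => if s ≠ "" then [s] else []
   | none => []) ++
  (match row.lookup "next" with
   | some nxt => if nxt ≠ "" ∧ nxt ≠ "-" then [nxt] else []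
   | none => [])

-- the tagged candidates one row contributes at base position pos
def rowOcc_station_order (pos : Int) (row : List (String × String)) : List (Int × String) :=
  (match row.lookup "cur_station" with
   | some s => if s ≠ "" then [(pos, s)] else []
   | none => []) ++
  (match row.lookup "next" with
   | some nxt => if nxt ≠ "" ∧ nxt ≠ "-" then [(pos + 1, nxt)] else []
   | none => [])

-- one row of A's loop = folding Set.add over that row's candidate list
lemma aStep_eq_foldl_add (acc : List String) (i : List (String × String)) :
    aStep_station_order acc i = List.foldl PySem.Set.add acc (cands_station_order i) := by
  unfold aStep_station_order cands_station_order
  cases i.lookup "cur_station" with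
  | none =>
    cases i.lookup "next" with
    | none => simp
    | some nxt =>
      by_cases h1 : nxt = "" <;> by_cases h2 : nxt = "-" <;>
        simp [h1, h2, PySem.Set.add, List.contains_eq_mem]
  | some s =>
    cases i.lookup "next" with
    | none =>
      by_cases h1 : s = "" <;> simp [h1, PySem.Set.add, List.contains_eq_mem]
    | some nxt =>
      by_cases h1 : s = "" <;> by_cases h2 : nxt = "" <;> by_cases h3 : nxt = "-" <;>
        simp [h1, h2, h3, PySem.Set.add, List.contains_eq_mem]

lemma foldl_aStep_eq (ld : List (List (String × String))) (acc : List String) :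
    List.foldl aStep_station_order acc ld
      = List.foldl PySem.Set.add acc (ld.flatMap cands_station_order) := by
  induction ld generalizing acc with
  | nil => rfl
  | cons i t ih => simp [List.flatMap_cons, List.foldl_append, ih, aStep_eq_foldl_add]

-- one row of B's pass 1 appends exactly rowOcc and advances pos by 2
lemma bStep1_eq (acc : List (Int × String)) (pos : Int) (row : List (String × String)) :
    bStep1_station_order (acc, pos) row = (acc ++ rowOcc_station_order pos row, pos + 2) := by
  unfold bStep1_station_order rowOcc_station_order
  cases row.lookup "cur_station" with
  | none =>
    cases row.lookup "next" with
    | none => simp; ring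
    | some nxt =>
      by_cases h1 : nxt = "" <;> by_cases h2 : nxt = "-" <;> simp [h1, h2] <;> ring
  | some s =>
    cases row.lookup "next" with
    | none => by_cases h1 : s = "" <;> simp [h1] <;> ring
    | some nxt =>
      by_cases h1 : s = "" <;> by_cases h2 : nxt = "" <;> by_cases h3 : nxt = "-" <;>
        simp [h1, h2, h3] <;> ring

lemma rowOcc_map_snd (pos : Int) (row : List (String × String)) :
    (rowOcc_station_order pos row).map Prod.snd = cands_station_order row := by
  unfold rowOcc_station_order cands_station_order
  cases row.lookup "cur_station" <;> cases row.lookup "next" <;>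
    simp <;> split_ifs <;> simp

lemma rowOcc_bounds (pos : Int) (row : List (String × String)) :
    ∀ q ∈ rowOcc_station_order pos row, pos ≤ q.1 ∧ q.1 < pos + 2 := by
  intro q hq
  unfold rowOcc_station_order at hq
  rcases List.mem_append.mp hq with h | h
  · cases hx : row.lookup "cur_station" with
    | none => rw [hx] at h; simp at h
    | some s =>
      rw [hx] at h
      simp at h
      rcases h with ⟨-, rfl⟩
      exact ⟨le_rfl, show pos < pos + 2 by omega⟩
  · cases hx : row.lookup "next" with
    | none => rw [hx] at h; simp at h
    | some nxt =>
      rw [hx] at h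
      simp at h
      rcases h with ⟨-, rfl⟩
      exact ⟨show pos ≤ pos + 1 by omega, show pos + 1 < pos + 2 by omega⟩

lemma rowOcc_pairwise (pos : Int) (row : List (String × String)) :
    (rowOcc_station_order pos row).Pairwise (fun a b => a.1 < b.1) := by
  unfold rowOcc_station_order
  cases row.lookup "cur_station" <;> cases row.lookup "next" <;> simp <;> split_ifs <;>
    simp

-- pass 1, folded: the snd-projection is the flat candidate list, positions are strictly
-- increasing and bounded by the final counter
lemma bPass1_props (ld : List (List (String × String))) :
    ∀ (acc : List (Int × String)) (pos : Int),
      (∀ q ∈ acc, q.1 < pos) → acc.Pairwise (fun a b => a.1 < b.1) →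
      (ld.foldl bStep1_station_order (acc, pos)).1.map Prod.snd
          = acc.map Prod.snd ++ ld.flatMap cands_station_order
      ∧ (ld.foldl bStep1_station_order (acc, pos)).1.Pairwise (fun a b => a.1 < b.1)
      ∧ ∀ q ∈ (ld.foldl bStep1_station_order (acc, pos)).1,
          q.1 < (ld.foldl bStep1_station_order (acc, pos)).2 := by
  induction ld with
  | nil => intro acc pos hb hpw; exact ⟨by simp, hpw, hb⟩
  | cons row t ih =>
    intro acc pos hb hpw
    rw [List.foldl_cons, bStep1_eq]
    have hb' : ∀ q ∈ acc ++ rowOcc_station_order pos row, q.1 < pos + 2 := by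
      intro q hq
      rcases List.mem_append.mp hq with h | h
      · have := hb q h; omega
      · exact (rowOcc_bounds pos row q h).2
    have hpw' : (acc ++ rowOcc_station_order pos row).Pairwise (fun a b => a.1 < b.1) := by
      rw [List.pairwise_append]
      refine ⟨hpw, rowOcc_pairwise pos row, ?_⟩
      intro a ha b hbm
      have h1 := hb a ha
      have h2 := (rowOcc_bounds pos row b hbm).1
      omega
    obtain ⟨h1, h2, h3⟩ := ih (acc ++ rowOcc_station_order pos row) (pos + 2) hb' hpw'
    refine ⟨?_, h2, h3⟩
    rw [h1, List.map_append, rowOcc_map_snd, List.flatMap_cons, List.append_assoc]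

-- pass 2, folded: with strictly increasing positions that dominate the stored values,
-- the stored earliest positions stay strictly increasing along the key list
lemma bPass2_pairwise (occ : List (Int × String)) :
    ∀ (d : PySem.Dict String Int),
      d.keys.Nodup →
      d.keys.Pairwise (fun a b => d.getD a 0 < d.getD b 0) →
      (∀ k ∈ d.keys, ∀ q ∈ occ, d.getD k 0 < q.1) →
      occ.Pairwise (fun a b => a.1 < b.1) →
      (occ.foldl bStep2_station_order d).keys.Pairwise
        (fun a b => (occ.foldl bStep2_station_order d).getD a 0
                  < (occ.foldl bStep2_station_order d).getD b 0) := by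
  induction occ with
  | nil => intro d _ hpw _ _; simpa using hpw
  | cons q t ih =>
    intro d hnd hpw hb hocc
    obtain ⟨p, s⟩ := q
    rw [List.foldl_cons]
    have hstep : bStep2_station_order d (p, s) = d.insert s (min (d.getD s p) p) := rfl
    rw [hstep]
    by_cases hc : d.contains s = true
    · -- s already present: the insert rewrites the stored value with itself
      have hks : s ∈ d.keys := (PySem.Dict.contains_iff_mem_keys d s).mp hc
      obtain ⟨v, hv⟩ : ∃ v, d.get? s = some v := by
        have := PySem.Dict.contains_eq_isSome_get? d s
        rw [hc] at this
        exact Option.isSome_iff_exists.mp this.symm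
      have hgp : d.getD s p = v := PySem.Dict.getD_of_get?_eq_some d p hv
      have hg0 : d.getD s 0 = v := PySem.Dict.getD_of_get?_eq_some d 0 hv
      have hvp : v < p := by
        have := hb s hks (p, s) (List.mem_cons_self)
        rwa [hg0] at this
      have hmin : min (d.getD s p) p = v := by rw [hgp]; exact min_eq_left hvp.le
      rw [hmin]
      have hgeq : ∀ k, (d.insert s v).getD k 0 = d.getD k 0 := by
        intro k
        rw [PySem.Dict.getD_insert]
        split
        · next h => rw [h, hg0]
        · rfl
      have hkeq : (d.insert s v).keys = d.keys := PySem.Dict.keys_insert_of_contains d v hc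
      apply ih
      · rw [hkeq]; exact hnd
      · rw [hkeq]; simp only [hgeq]; exact hpw
      · rw [hkeq]; simp only [hgeq]
        intro k hk q' hq'
        exact hb k hk q' (List.mem_cons_of_mem _ hq')
      · exact hocc.of_cons
    · -- s fresh: appended with value p, strictly above everything stored
      have hcf : d.contains s = false := by simpa using hc
      have hgp : d.getD s p = p := PySem.Dict.getD_of_not_contains d p hcf
      have hmin : min (d.getD s p) p = p := by rw [hgp]; exact min_self p
      rw [hmin]
      have hks : s ∉ d.keys := fun h => hc ((PySem.Dict.contains_iff_mem_keys d s).mpr h)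
      have hkeq : (d.insert s p).keys = d.keys ++ [s] :=
        PySem.Dict.keys_insert_of_not_contains d p hcf
      have hgeq : ∀ k, (d.insert s p).getD k 0 = if k = s then p else d.getD k 0 := by
        intro k; rw [PySem.Dict.getD_insert]
      apply ih
      · rw [hkeq]
        refine List.Nodup.append hnd (List.nodup_singleton s) ?_
        intro a ha hmem
        simp only [List.mem_singleton] at hmem
        exact hks (hmem ▸ ha)
      · rw [hkeq]
        rw [List.pairwise_append]
        refine ⟨?_, List.pairwise_singleton _ _, ?_⟩
        · refine hpw.imp_of_mem ?_
          intro a b ha hbm hlt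
          have hna : a ≠ s := fun h => hks (h ▸ ha)
          have hnb : b ≠ s := fun h => hks (h ▸ hbm)
          rw [hgeq a, hgeq b, if_neg hna, if_neg hnb]
          exact hlt
        · intro a ha b hbm
          simp only [List.mem_singleton] at hbm
          have hna : a ≠ s := fun h => hks (h ▸ ha)
          rw [hbm, hgeq a, hgeq s, if_neg hna, if_pos rfl]
          exact hb a ha (p, s) (List.mem_cons_self)
      · rw [hkeq]
        intro k hk q' hq'
        rcases List.mem_append.mp hk with h | h
        · have hna : k ≠ s := fun he => hks (he ▸ h)
          rw [hgeq k, if_neg hna]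
          exact hb k h q' (List.mem_cons_of_mem _ hq')
        · simp only [List.mem_singleton] at h
          subst h
          rw [hgeq k, if_pos rfl]
          exact (List.pairwise_cons.mp hocc).1 q' hq'
      · exact hocc.of_cons

-- the keys of the pass-2 dict are the ordered dedup of the occurrence stations
lemma bPass2_keys (occ : List (Int × String)) :
    (occ.foldl bStep2_station_order PySem.Dict.empty).keys
      = PySem.Set.ofList (occ.map Prod.snd) := by
  have h := PySem.Dict.keys_foldl_insert_key (l := occ) (key := Prod.snd)
    (f := fun d x => min (d.getD x.2 x.1) x.1) (d := (PySem.Dict.empty : PySem.Dict String Int))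
  have : (occ.foldl bStep2_station_order PySem.Dict.empty)
      = occ.foldl (fun d x => d.insert x.2 (min (d.getD x.2 x.1) x.1)) PySem.Dict.empty := rfl
  rw [this, h]
  simp [PySem.Dict.keys_empty, PySem.Set.update, PySem.Set.ofList_eq_foldl]

-- ===== VERDICT (by name: the statement is the Claim_ definition above) =====
theorem station_order_spec : Claim_equal_station_order := by
  intro ld _
  show station_order ld = station_order_alt ld
  obtain ⟨h1, h2, h3⟩ := bPass1_props ld [] 0 (by simp) (by simp)
  set occ := (ld.foldl bStep1_station_order ([], 0)).1 with hocc
  set first := occ.foldl bStep2_station_order PySem.Dict.empty with hfirst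
  have hkeys : first.keys = PySem.Set.ofList (occ.map Prod.snd) := bPass2_keys occ
  have hA : station_order ld = PySem.Set.ofList (occ.map Prod.snd) := by
    rw [station_order, foldl_aStep_eq, ← PySem.Set.ofList_eq_foldl]
    rw [h1]; simp
  have hpw : first.keys.Pairwise (fun a b => first.getD a 0 < first.getD b 0) := by
    apply bPass2_pairwise occ PySem.Dict.empty
    · simp [PySem.Dict.keys_empty]
    · simp [PySem.Dict.keys_empty]
    · simp [PySem.Dict.keys_empty]
    · exact h2
  have hsorted : PySem.List.sorted first.keys (fun k => first.getD k 0) false = first.keys :=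
    PySem.List.sorted_eq_self_of_pairwise first.keys (fun k => first.getD k 0)
      (hpw.imp fun h => le_of_lt h)
  rw [station_order_alt]
  simp only [← hocc, ← hfirst]
  rw [hsorted, hkeys, hA]
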